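-- pv_equiv track=rewrite | github.com/bvalot/pyMLST | find_recombinaison.py | compar_seqs
-- ===== SOURCE A (Python) =====
-- def compar_seqs(seqs):
--     count = 0
--     dim = len(seqs[0])
--     for j in range(0, len(seqs[0])):
--         d = set([s[j] for s in seqs])
--         if '-' in d :
--             d.remove('-')
--         if len(d) > 1:
--             count += 1
--     return count
-- ===== SOURCE B (Python) =====
-- def compar_seqs(seqs):
--     count = 0
--     for j in range(len(seqs[0])):
--         ref = None
--         for s in seqs:
--             c = s[j]
--             if c == '-':
--                 continue
--             if ref is None:
--                 ref = c
--             elif c != ref: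
--                 count += 1
--                 break
--     return count
-- ===== Notes on version B (the rewrite author's own statement) =====
-- stated objective: simpler
-- what changed: Per column, instead of materialising a set of all characters and removing '-', B scans the sequences keeping one reference non-gap character and short-circuits (break) as soon as a different non-gap character is seen.
import Mathlib
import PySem

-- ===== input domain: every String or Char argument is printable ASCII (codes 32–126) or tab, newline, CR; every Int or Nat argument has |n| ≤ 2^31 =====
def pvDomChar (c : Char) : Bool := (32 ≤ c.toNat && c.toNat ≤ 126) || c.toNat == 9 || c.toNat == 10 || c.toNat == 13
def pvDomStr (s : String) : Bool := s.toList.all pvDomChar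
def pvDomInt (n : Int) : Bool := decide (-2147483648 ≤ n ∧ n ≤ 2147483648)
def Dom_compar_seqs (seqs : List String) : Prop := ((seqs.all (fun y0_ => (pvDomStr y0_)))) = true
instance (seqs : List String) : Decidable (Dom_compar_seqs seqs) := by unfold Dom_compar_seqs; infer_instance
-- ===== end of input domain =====

-- B replaces the per-column set construction by a single-reference-character scan with early exit; objective: simpler.

-- ===== PORT A =====
def compar_seqs (seqs : List String) : Int :=
  let s0 := (PySem.List.pyGet? seqs 0).getD ""
  let dim := PySem.Str.len s0
  (PySem.List.pyRange 0 dim 1).foldl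
    (fun count j =>
      let d : PySem.Set Char :=
        PySem.Set.ofList (seqs.map (fun s => (PySem.Str.pyGet? s j).getD ' '))
      let d' := if PySem.Set.contains d '-' then (PySem.Set.remove? d '-').getD [] else d
      if 1 < PySem.Set.len d' then count + 1 else count) 0

-- ===== PORT B =====
-- inner loop of Source B: one reference non-gap char; returns true and stops at the first differing non-gap char
def pvColVaried : List String → Int → Option Char → Bool
  | [], _, _ => false
  | s :: rest, j, ref =>
      let c := (PySem.Str.pyGet? s j).getD ' '
      if c = '-' then pvColVaried rest j ref
      else
        match ref with
        | none => pvColVaried rest j (some c)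
        | some r => if c = r then pvColVaried rest j ref else true

def compar_seqs_alt (seqs : List String) : Int :=
  let s0 := (PySem.List.pyGet? seqs 0).getD ""
  (PySem.List.pyRange 0 (PySem.Str.len s0) 1).foldl
    (fun count j => if pvColVaried seqs j none then count + 1 else count) 0

-- ===== PRECONDITION & SPEC =====
-- Pre_ excludes exactly the inputs where A raises IndexError: empty seqs, or a sequence shorter than seqs[0].
def Pre_compar_seqs (seqs : List String) : Prop :=
  seqs ≠ [] ∧ ∀ s ∈ seqs, seqs.headI.toList.length ≤ s.toList.length
instance (seqs : List String) : Decidable (Pre_compar_seqs seqs) := by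
  unfold Pre_compar_seqs; infer_instance
def pvWitness_compar_seqs : List String := ["ab-", "aa-", "ba-"]

def Spec_compar_seqs (seqs : List String) (out : Int) : Prop := out = compar_seqs_alt seqs
instance (seqs : List String) (out : Int) : Decidable (Spec_compar_seqs seqs out) := by unfold Spec_compar_seqs; infer_instance

-- ===== CLAIM (what is proved, stated in full; the proofs are below) =====
def Claim_equal_compar_seqs : Prop := ∀ (seqs : List String), Dom_compar_seqs seqs → Pre_compar_seqs seqs → Spec_compar_seqs seqs (compar_seqs seqs)

-- ===== LEMMAS AND PROOFS =====

-- the character both programs read at column j of sequence s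
def pvCharAt (j : Int) (s : String) : Char := (PySem.Str.pyGet? s j).getD ' '

theorem pvColVaried_cons_some (s : String) (rest : List String) (j : Int) (r : Char) :
    pvColVaried (s :: rest) j (some r) =
      if pvCharAt j s = '-' then pvColVaried rest j (some r)
      else if pvCharAt j s = r then pvColVaried rest j (some r) else true := rfl

theorem pvColVaried_cons_none (s : String) (rest : List String) (j : Int) :
    pvColVaried (s :: rest) j none =
      if pvCharAt j s = '-' then pvColVaried rest j none
      else pvColVaried rest j (some (pvCharAt j s)) := rfl

-- the scan with a fixed reference char finds a differing non-gap char
theorem pvColVaried_some (seqs : List String) (j : Int) (r : Char) :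
    pvColVaried seqs j (some r) = true ↔
      ∃ s ∈ seqs, pvCharAt j s ≠ '-' ∧ pvCharAt j s ≠ r := by
  induction seqs with
  | nil => simp [pvColVaried]
  | cons s rest ih =>
      rw [pvColVaried_cons_some]
      by_cases hg : pvCharAt j s = '-'
      · rw [if_pos hg, ih]
        constructor
        · rintro ⟨t, ht, h⟩; exact ⟨t, List.mem_cons_of_mem _ ht, h⟩
        · rintro ⟨t, ht, h1, h2⟩
          rcases List.mem_cons.mp ht with rfl | ht
          · exact absurd hg h1
          · exact ⟨t, ht, h1, h2⟩
      · rw [if_neg hg]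
        by_cases hr : pvCharAt j s = r
        · rw [if_pos hr, ih]
          constructor
          · rintro ⟨t, ht, h⟩; exact ⟨t, List.mem_cons_of_mem _ ht, h⟩
          · rintro ⟨t, ht, h1, h2⟩
            rcases List.mem_cons.mp ht with rfl | ht
            · exact absurd hr h2
            · exact ⟨t, ht, h1, h2⟩
        · rw [if_neg hr]
          constructor
          · intro _; exact ⟨s, List.mem_cons_self, hg, hr⟩
          · intro _; rfl

-- the scan starting with no reference finds two distinct non-gap chars
theorem pvColVaried_none (seqs : List String) (j : Int) :
    pvColVaried seqs j none = true ↔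
      ∃ s ∈ seqs, ∃ t ∈ seqs,
        pvCharAt j s ≠ '-' ∧ pvCharAt j t ≠ '-' ∧ pvCharAt j s ≠ pvCharAt j t := by
  induction seqs with
  | nil => simp [pvColVaried]
  | cons s rest ih =>
      rw [pvColVaried_cons_none]
      by_cases hg : pvCharAt j s = '-'
      · rw [if_pos hg, ih]
        constructor
        · rintro ⟨a, ha, b, hb, h⟩
          exact ⟨a, List.mem_cons_of_mem _ ha, b, List.mem_cons_of_mem _ hb, h⟩
        · rintro ⟨a, ha, b, hb, h1, h2, h3⟩
          rcases List.mem_cons.mp ha with rfl | ha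
          · exact absurd hg h1
          rcases List.mem_cons.mp hb with rfl | hb
          · exact absurd hg h2
          exact ⟨a, ha, b, hb, h1, h2, h3⟩
      · rw [if_neg hg, pvColVaried_some]
        constructor
        · rintro ⟨t, ht, h1, h2⟩
          exact ⟨s, List.mem_cons_self, t, List.mem_cons_of_mem _ ht, hg, h1, Ne.symm h2⟩
        · rintro ⟨a, ha, b, hb, h1, h2, h3⟩
          rcases List.mem_cons.mp ha with hae | ha
          · rcases List.mem_cons.mp hb with hbe | hb
            · exact absurd (by rw [hae, hbe]) h3
            · exact ⟨b, hb, h2, fun e => h3 (by rw [hae, ← e])⟩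
          · rcases List.mem_cons.mp hb with hbe | hb
            · exact ⟨a, ha, h1, fun e => h3 (by rw [e, hbe])⟩
            · by_cases hab : pvCharAt j a = pvCharAt j s
              · exact ⟨b, hb, h2, fun hbs => h3 (hab.trans hbs.symm)⟩
              · exact ⟨a, ha, h1, hab⟩

-- a duplicate-free list has length > 1 iff it has two distinct members
theorem pvNodup_two {l : List Char} (h : l.Nodup) :
    1 < l.length ↔ ∃ a ∈ l, ∃ b ∈ l, a ≠ b := by
  match l with
  | [] => simp
  | [a] => simp
  | a :: b :: t =>
      constructor
      · intro _
        have hab : a ≠ b := by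
          intro e
          exact (List.nodup_cons.mp h).1 (e ▸ List.mem_cons_self)
        exact ⟨a, List.mem_cons_self, b, List.mem_cons_of_mem _ List.mem_cons_self, hab⟩
      · intro _
        simp only [List.length_cons]
        omega

-- A's per-column test equals B's per-column scan
theorem pvCol_iff (seqs : List String) (j : Int) :
    ((1 : Int) < PySem.Set.len
      (let d : PySem.Set Char := PySem.Set.ofList (seqs.map (fun s => (PySem.Str.pyGet? s j).getD ' '))
       if PySem.Set.contains d '-' then (PySem.Set.remove? d '-').getD [] else d)) ↔
      pvColVaried seqs j none = true := by
  simp only []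
  set d : PySem.Set Char := PySem.Set.ofList (seqs.map (fun s => (PySem.Str.pyGet? s j).getD ' ')) with hd
  have hxs : ∀ a : Char, a ∈ d ↔ ∃ s ∈ seqs, pvCharAt j s = a := by
    intro a
    rw [hd, PySem.Set.mem_ofList, List.mem_map]
    constructor
    · rintro ⟨s, hs, rfl⟩; exact ⟨s, hs, rfl⟩
    · rintro ⟨s, hs, rfl⟩; exact ⟨s, hs, rfl⟩
  have hnd : d.Nodup := PySem.Set.nodup_ofList _
  -- characterise the set after gap removal
  have key : ∀ d' : PySem.Set Char, d'.Nodup →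
      (∀ a : Char, a ∈ d' ↔ (a ≠ '-' ∧ ∃ s ∈ seqs, pvCharAt j s = a)) →
      (((1 : Int) < PySem.Set.len d') ↔ pvColVaried seqs j none = true) := by
    intro d' hnd' hmem
    have h1 : ((1 : Int) < PySem.Set.len d') ↔ 1 < d'.length := by
      simp [PySem.Set.len]
    rw [h1, pvNodup_two hnd', pvColVaried_none]
    constructor
    · rintro ⟨a, ha, b, hb, hab⟩
      obtain ⟨hga, s, hs, rfl⟩ := (hmem a).mp ha
      obtain ⟨hgb, t, ht, rfl⟩ := (hmem b).mp hb
      exact ⟨s, hs, t, ht, hga, hgb, hab⟩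
    · rintro ⟨s, hs, t, ht, h1, h2, h3⟩
      exact ⟨_, (hmem _).mpr ⟨h1, s, hs, rfl⟩, _, (hmem _).mpr ⟨h2, t, ht, rfl⟩, h3⟩
  by_cases hin : PySem.Set.contains d '-'
  · rw [if_pos hin]
    have hmem : '-' ∈ d := (PySem.Set.contains_iff d '-').mp hin
    rw [PySem.Set.remove?_of_mem hmem]
    refine key _ (PySem.Set.nodup_discard _ _ hnd) (fun a => ?_)
    rw [Option.getD_some, PySem.Set.mem_discard, hxs a]
    tauto
  · rw [if_neg hin]
    refine key _ hnd (fun a => ?_)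
    have hng : '-' ∉ d := fun h => hin ((PySem.Set.contains_iff d '-').mpr h)
    rw [hxs a]
    constructor
    · rintro ⟨s, hs, rfl⟩
      exact ⟨fun e => hng ((hxs _).mpr ⟨s, hs, e⟩), s, hs, rfl⟩
    · rintro ⟨_, h⟩; exact h

theorem compar_seqs_eq_alt (seqs : List String) : compar_seqs seqs = compar_seqs_alt seqs := by
  unfold compar_seqs compar_seqs_alt
  simp only []
  refine PySem.List.foldl_congr_mem _ _ _ _ (fun count j _ => ?_)
  have h := pvCol_iff seqs j
  simp only [] at h
  by_cases hv : pvColVaried seqs j none = true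
  · rw [if_pos (h.mpr hv), hv, if_pos rfl]
  · rw [if_neg (fun hc => hv (h.mp hc)), if_neg (by simpa using hv)]

-- ===== VERDICT (by name: the statement is the Claim_ definition above) =====
theorem compar_seqs_spec : Claim_equal_compar_seqs := by
  intro seqs _ _
  unfold Spec_compar_seqs
  exact compar_seqs_eq_alt seqs
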